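-- pv_equiv track=rewrite | github.com/tothefullest08/TIL-for-algorithm | 2019_Q3_Q4/프로그래머스/쇠막대기.py | solution
-- ===== SOURCE A (Python) =====
-- def solution(arrangement):
--     arrangement = list(arrangement)
--     pipe_idx_lst = []
--     answer = 0
--
--     #파이프 갯수, 시작위치 저장
--     for i in range(len(arrangement)-1):
--         if arrangement[i] == '(' and arrangement[i+1] == ')':
--             continue
--         elif arrangement[i] == '(':
--             pipe_idx_lst.append(i)
--
--     #자르기
--     for i in pipe_idx_lst:
--         Q = []
--         Q.append([arrangement[i], i])
--         tmp_pcs = 1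
--         for j in range(i+1, len(arrangement)):
--             if arrangement[j] == '(':
--                 Q.append([arrangement[j], j])
--             elif arrangement[j] == ')' and Q[-1][0] == '(' and Q[-1][1] + 1 == j:
--                 Q.pop(-1)
--                 tmp_pcs += 1
--             elif arrangement[j] == ')':
--                 Q.pop(-1)
--
--             if not Q:
--                 answer += tmp_pcs
--                 break
--
--     return answer
-- ===== SOURCE B (Python) =====
-- def solution(arrangement):
--     # One left-to-right pass: a stack of laser-counts-at-open for currently
--     # open pipes; each laser '()' bumps a global counter; a pipe close adds
--     # 1 + lasers seen since its open.
--     answer = 0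
--     lasers = 0
--     stack = []
--     prev = None
--     for c in arrangement:
--         if prev == '(' and c == ')':
--             lasers += 1
--         else:
--             if prev == '(':
--                 stack.append(lasers)
--             if c == ')' and stack:
--                 answer += 1 + lasers - stack.pop()
--         prev = c
--     return answer
-- ===== Notes on version B (the rewrite author's own statement) =====
-- stated objective: alternative
-- what changed: Replaced the per-pipe rescans (an index list of pipe starts, each re-simulated with its own bracket stack until its closing position) by a single left-to-right pass that keeps a global laser counter and a stack of laser-counts-at-open, adding 1 + lasers-since-open when a pipe closes.
import Mathlib
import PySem

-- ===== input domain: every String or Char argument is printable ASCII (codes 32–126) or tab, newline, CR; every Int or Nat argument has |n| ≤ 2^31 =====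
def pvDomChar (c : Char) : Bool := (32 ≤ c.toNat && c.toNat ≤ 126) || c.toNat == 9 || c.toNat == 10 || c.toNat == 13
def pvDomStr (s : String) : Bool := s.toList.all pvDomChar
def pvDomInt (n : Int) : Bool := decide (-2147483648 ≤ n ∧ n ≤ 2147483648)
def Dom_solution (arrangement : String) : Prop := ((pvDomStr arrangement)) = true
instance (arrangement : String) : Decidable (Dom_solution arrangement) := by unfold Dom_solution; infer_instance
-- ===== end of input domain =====

-- B replaces A's per-pipe rescans by one left-to-right pass with a stack of
-- laser-counts-at-open; equivalence is proved for every input (A is total).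

-- ===== PORT A =====
-- A's first loop: collect pipe start indices (a '(' not immediately followed by ')').
-- Stack Q grows at the head (Python appends/pops at the end); indices are Nat (all
-- Python index values here are nonnegative and in range by construction).
def pipesOf (s : List Char) : List Nat :=
  (List.range (s.length - 1)).foldl
    (fun acc i =>
      if s.getD i ' ' = '(' ∧ s.getD (i + 1) ' ' = ')' then acc
      else if s.getD i ' ' = '(' then acc ++ [i]
      else acc)
    []

-- A's inner loop for one pipe: scan indices j, maintain Q and tmp_pcs; on empty Q
-- add tmp_pcs and break (returned as the increment; 0 if the loop runs out).
-- Python's two ')' branches are grouped under one match on the head of Q; a pop of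
-- an empty Q (which would raise in Python) is unreachable since the loop breaks
-- as soon as Q empties.
def innerA (s : List Char) : List Nat → List (Char × Nat) → Int → Int
  | [], _, _ => 0
  | j :: js, Q, tmp =>
    let c := s.getD j ' '
    let p :=
      if c = '(' then ((c, j) :: Q, tmp)
      else if c = ')' then
        match Q with
        | (qc, qi) :: qs => if qc = '(' ∧ qi + 1 = j then (qs, tmp + 1) else (qs, tmp)
        | [] => ([], tmp)
      else (Q, tmp)
    if p.1 = [] then p.2 else innerA s js p.1 p.2

def solution (arrangement : String) : Int :=
  let s := arrangement.toList
  (pipesOf s).foldl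
    (fun answer i =>
      answer + innerA s (List.range' (i + 1) (s.length - (i + 1))) [('(', i)] 1)
    0

-- ===== PORT B =====
-- One pass: prev = previous character, lasers = lasers seen so far, stack = the
-- laser count at each still-open pipe's start (head = innermost pipe).
def bLoop : List Char → Int → Int → List Int → Option Char → Int
  | [], ans, _, _, _ => ans
  | c :: cs, ans, lasers, st, prev =>
    if prev = some '(' ∧ c = ')' then bLoop cs ans (lasers + 1) st (some c)
    else
      let st' := if prev = some '(' then lasers :: st else st
      if c = ')' ∧ st' ≠ [] then
        bLoop cs (ans + 1 + lasers - st'.headD 0) lasers st'.tail (some c)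
      else bLoop cs ans lasers st' (some c)

def solution_alt (arrangement : String) : Int :=
  bLoop arrangement.toList 0 0 [] none

-- ===== PRECONDITION & SPEC =====
def Spec_solution (arrangement : String) (out : Int) : Prop := out = solution_alt arrangement
instance (arrangement : String) (out : Int) : Decidable (Spec_solution arrangement out) := by unfold Spec_solution; infer_instance

-- ===== CLAIM (what is proved, stated in full; the proofs are below) =====
def Claim_equal_solution : Prop := ∀ (arrangement : String), Dom_solution arrangement → Spec_solution arrangement (solution arrangement)

-- ===== LEMMAS AND PROOFS =====

-- Depth-only view of A's inner loop: Q is replaced by its length d, the adjacency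
-- test by "previous char was '('".
def innerScan : Option Char → List Char → Nat → Int → Int
  | _, [], _, _ => 0
  | prev, c :: cs, d, tmp =>
    let p :=
      if c = '(' then (d + 1, tmp)
      else if c = ')' then (d - 1, if prev = some '(' then tmp + 1 else tmp)
      else (d, tmp)
    if p.1 = 0 then p.2 else innerScan (some c) cs p.1 p.2

-- Sum over the pipes opening in the suffix (prev = char before the suffix):
-- a pipe at the position of prev contributes its inner scan.
def asum : Option Char → List Char → Int
  | _, [] => 0
  | prev, c :: cs =>
    (if prev = some '(' ∧ c ≠ ')' then innerScan prev (c :: cs) 1 1 else 0) + asum (some c) cs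

-- Pending contributions of a stack of open pipes at depths d0, d0+1, … .
def stScan : Option Char → List Char → Int → List Int → Nat → Int
  | _, _, _, [], _ => 0
  | prev, cs, L, e :: es, d0 =>
    innerScan prev cs d0 (1 + L - e) + stScan prev cs L es (d0 + 1)

-- ---- generic helpers ----

theorem foldl_add_sum (f : Nat → Int) : ∀ (l : List Nat) (a : Int),
    l.foldl (fun x i => x + f i) a = a + (l.map f).sum := by
  intro l
  induction l with
  | nil => intro a; simp
  | cons i l ih => intro a; simp [ih, add_assoc]

def pipeP (s : List Char) (i : Nat) : Bool :=
  s.getD i ' ' == '(' && s.getD (i + 1) ' ' != ')'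

def contrib (s : List Char) (i : Nat) : Int :=
  innerA s (List.range' (i + 1) (s.length - (i + 1))) [('(', i)] 1

theorem pipesOf_aux (s : List Char) : ∀ (l : List Nat) (acc : List Nat),
    l.foldl
      (fun acc i =>
        if s.getD i ' ' = '(' ∧ s.getD (i + 1) ' ' = ')' then acc
        else if s.getD i ' ' = '(' then acc ++ [i]
        else acc)
      acc = acc ++ l.filter (pipeP s) := by
  intro l
  induction l with
  | nil => intro acc; simp
  | cons i l ih =>
    intro acc
    rw [List.foldl_cons, ih]
    by_cases h1 : s.getD i ' ' = '('
    · by_cases h2 : s.getD (i + 1) ' ' = ')'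
      · simp only [List.getD_eq_getElem?_getD] at h1 h2
        simp [h1, h2, pipeP, List.getD_eq_getElem?_getD]
      · simp only [List.getD_eq_getElem?_getD] at h1 h2
        simp [h1, h2, pipeP, List.getD_eq_getElem?_getD]
    · simp only [List.getD_eq_getElem?_getD] at h1
      simp [h1, pipeP, List.getD_eq_getElem?_getD]

theorem pipesOf_eq_filter (s : List Char) :
    pipesOf s = (List.range (s.length - 1)).filter (pipeP s) := by
  unfold pipesOf
  rw [pipesOf_aux]
  simp

theorem drop_cons (s : List Char) (j : Nat) (c : Char) (cs : List Char)
    (h : s.drop j = c :: cs) :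
    j < s.length ∧ s.getD j ' ' = c ∧ s.drop (j + 1) = cs := by
  have hlen : s.length - j = cs.length + 1 := by
    have := congrArg List.length h
    simpa using this
  have hj : j < s.length := by omega
  refine ⟨hj, ?_, ?_⟩
  · have h0 : (s.drop j).getD 0 ' ' = c := by rw [h]; rfl
    rw [List.getD_eq_getElem?_getD] at h0 ⊢
    rw [List.getElem?_drop] at h0
    simpa using h0
  · have : s.drop (j + 1) = (s.drop j).drop 1 := by
      rw [List.drop_drop]
    rw [this, h]
    rfl

-- ---- bridge from A's inner loop to the depth-only scan ----

def InvQ (s : List Char) (Q : List (Char × Nat)) (j : Nat) : Prop :=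
  Q ≠ [] ∧
  (∀ p ∈ Q, p.1 = '(' ∧ p.2 + 1 ≤ j ∧ (p.2 + 1 = j → s.getD (j - 1) ' ' = '(')) ∧
  (s.getD (j - 1) ' ' = '(' → Q.head? = some ('(', j - 1))

theorem innerA_eq_innerScan (s : List Char) : ∀ (cs : List Char) (j : Nat)
    (Q : List (Char × Nat)) (tmp : Int), s.drop j = cs → 1 ≤ j → InvQ s Q j →
    innerA s (List.range' j (s.length - j)) Q tmp =
      innerScan (some (s.getD (j - 1) ' ')) cs Q.length tmp := by
  intro cs
  induction cs with
  | nil =>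
    intro j Q tmp hdrop hj hinv
    have hle : s.length ≤ j := by
      have := congrArg List.length hdrop
      simp at this
      omega
    have h0 : s.length - j = 0 := by omega
    rw [h0]
    simp [innerA, innerScan]
  | cons c cs ih =>
    intro j Q tmp hdrop hj hinv
    obtain ⟨hjlt, hgd, hdrop'⟩ := drop_cons s j c cs hdrop
    have hr : List.range' j (s.length - j) = j :: List.range' (j + 1) (s.length - (j + 1)) := by
      have h1 : s.length - j = (s.length - (j + 1)) + 1 := by omega
      rw [h1, List.range'_succ]
    obtain ⟨hne, hall, hhead⟩ := hinv
    obtain ⟨⟨qc, qi⟩, qs, rfl⟩ := List.exists_cons_of_ne_nil hne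
    have hj1 : j + 1 - 1 = j := by omega
    rw [hr]
    by_cases hc1 : c = '('
    · -- push
      have hlhs : innerA s (j :: List.range' (j + 1) (s.length - (j + 1)))
          ((qc, qi) :: qs) tmp =
          innerA s (List.range' (j + 1) (s.length - (j + 1)))
            ((c, j) :: (qc, qi) :: qs) tmp := by
        simp only [innerA, hgd]
        simp [hc1]
      rw [hlhs]
      have hinv' : InvQ s ((c, j) :: (qc, qi) :: qs) (j + 1) := by
        refine ⟨by simp, ?_, ?_⟩
        · intro p hp
          rcases List.mem_cons.mp hp with h | h
          · subst h
            exact ⟨hc1, by omega, fun _ => by rw [hj1, hgd, hc1]⟩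
          · obtain ⟨ha, hb, _⟩ := hall p h
            exact ⟨ha, by omega, fun hcon => by omega⟩
        · intro _
          rw [hj1]
          simp [hc1]
      rw [ih (j + 1) _ tmp hdrop' (by omega) hinv']
      rw [hj1, hgd]
      have hrhs : innerScan (some (s.getD (j - 1) ' ')) (c :: cs)
          ((qc, qi) :: qs).length tmp =
          innerScan (some c) cs ((c, j) :: (qc, qi) :: qs).length tmp := by
        simp only [innerScan]
        simp [hc1]
      rw [hrhs]
    · by_cases hc2 : c = ')'
      · -- pop (laser or plain close)
        have hhq := hall (qc, qi) (List.mem_cons_self)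
        have hiff : (qc = '(' ∧ qi + 1 = j) ↔ s.getD (j - 1) ' ' = '(' := by
          constructor
          · intro h; exact hhq.2.2 h.2
          · intro h
            have := hhead h
            simp at this
            exact ⟨this.1, by omega⟩
        -- the new tmp after this step, on both sides
        set tmp' : Int := if s.getD (j - 1) ' ' = '(' then tmp + 1 else tmp with htmp'
        have hlhs : innerA s (j :: List.range' (j + 1) (s.length - (j + 1)))
            ((qc, qi) :: qs) tmp =
            (if qs = [] then tmp' else
              innerA s (List.range' (j + 1) (s.length - (j + 1))) qs tmp') := by
          simp only [innerA, hgd]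
          by_cases hl : s.getD (j - 1) ' ' = '('
          · have hlc : qc = '(' ∧ qi + 1 = j := hiff.mpr hl
            have hl' : s[j - 1]?.getD ' ' = '(' := by
              rw [← List.getD_eq_getElem?_getD]; exact hl
            simp [hc2, hlc, htmp', hl']
          · have hlc : ¬ (qc = '(' ∧ qi + 1 = j) := fun h => hl (hiff.mp h)
            have hl' : ¬ s[j - 1]?.getD ' ' = '(' := by
              rw [← List.getD_eq_getElem?_getD]; exact hl
            simp [hc2, hlc, htmp', hl']
        have hrhs : innerScan (some (s.getD (j - 1) ' ')) (c :: cs)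
            ((qc, qi) :: qs).length tmp =
            (if qs = [] then tmp' else innerScan (some c) cs qs.length tmp') := by
          simp only [innerScan]
          by_cases hq0 : qs = []
          · subst hq0
            simp [hc2, htmp']
          · have : ((qc, qi) :: qs).length - 1 = qs.length := by simp
            have hqlen : qs.length ≠ 0 := by
              simpa [List.length_eq_zero_iff] using hq0
            simp [hc2, htmp', hq0, hqlen]
        rw [hlhs, hrhs]
        by_cases hq0 : qs = []
        · simp [hq0]
        · simp only [if_neg hq0]
          have hinv' : InvQ s qs (j + 1) := by
            refine ⟨hq0, ?_, ?_⟩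
            · intro p hp
              obtain ⟨ha, hb, _⟩ := hall p (List.mem_cons_of_mem _ hp)
              exact ⟨ha, by omega, fun hcon => by omega⟩
            · intro h
              rw [hj1, hgd] at h
              exact absurd h (by rw [hc2]; decide)
          rw [ih (j + 1) qs tmp' hdrop' (by omega) hinv']
          rw [hj1, hgd]
      · -- other character: state unchanged
        have hlhs : innerA s (j :: List.range' (j + 1) (s.length - (j + 1)))
            ((qc, qi) :: qs) tmp =
            innerA s (List.range' (j + 1) (s.length - (j + 1))) ((qc, qi) :: qs) tmp := by
          simp only [innerA, hgd]
          simp [hc1, hc2]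
        have hrhs : innerScan (some (s.getD (j - 1) ' ')) (c :: cs)
            ((qc, qi) :: qs).length tmp =
            innerScan (some c) cs ((qc, qi) :: qs).length tmp := by
          simp only [innerScan]
          simp [hc1, hc2]
        rw [hlhs, hrhs]
        have hinv' : InvQ s ((qc, qi) :: qs) (j + 1) := by
          refine ⟨by simp, ?_, ?_⟩
          · intro p hp
            obtain ⟨ha, hb, _⟩ := hall p hp
            exact ⟨ha, by omega, fun hcon => by omega⟩
          · intro h
            rw [hj1, hgd] at h
            exact absurd h hc1
        rw [ih (j + 1) _ tmp hdrop' (by omega) hinv']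
        rw [hj1, hgd]

-- ---- bridge from A's outer sum to asum ----

theorem sum_contrib_eq_asum (s : List Char) : ∀ (cs : List Char) (j : Nat),
    1 ≤ j → s.drop j = cs →
    ((((List.range' (j - 1) (s.length - j)).filter (pipeP s)).map (contrib s)).sum : Int) =
      asum (some (s.getD (j - 1) ' ')) cs := by
  intro cs
  induction cs with
  | nil =>
    intro j hj hdrop
    have hle : s.length ≤ j := by
      have := congrArg List.length hdrop
      simp at this
      omega
    have h0 : s.length - j = 0 := by omega
    rw [h0]
    simp [asum]
  | cons c cs ih =>
    intro j hj hdrop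
    obtain ⟨hjlt, hgd, hdrop'⟩ := drop_cons s j c cs hdrop
    have hj1 : j - 1 + 1 = j := by omega
    have hr : List.range' (j - 1) (s.length - j) =
        (j - 1) :: List.range' j (s.length - (j + 1)) := by
      have h1 : s.length - j = (s.length - (j + 1)) + 1 := by omega
      rw [h1, List.range'_succ, hj1]
    rw [hr]
    have hih := ih (j + 1) (by omega) hdrop'
    rw [Nat.add_sub_cancel] at hih
    rw [List.filter_cons]
    by_cases hP : s.getD (j - 1) ' ' = '(' ∧ ¬ s.getD j ' ' = ')'
    · have hb : pipeP s (j - 1) = true := by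
        have h1 : s[j - 1]?.getD ' ' = '(' := by
          rw [← List.getD_eq_getElem?_getD]; exact hP.1
        have h2 : ¬ s[j]?.getD ' ' = ')' := by
          rw [← List.getD_eq_getElem?_getD]; exact hP.2
        simp only [pipeP, hj1, Bool.and_eq_true, beq_iff_eq, bne_iff_ne, ne_eq]
        exact ⟨h1, h2⟩
      rw [if_pos hb]
      simp only [List.map_cons, List.sum_cons]
      have hcb : contrib s (j - 1) = innerScan (some (s.getD (j - 1) ' ')) (c :: cs) 1 1 := by
        unfold contrib
        rw [hj1]
        have hinv : InvQ s [('(', j - 1)] j := by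
          refine ⟨by simp, ?_, by intro _; rfl⟩
          intro p hp
          simp at hp
          subst hp
          exact ⟨rfl, by omega, fun _ => hP.1⟩
        have := innerA_eq_innerScan s (c :: cs) j [('(', j - 1)] 1 hdrop hj hinv
        simpa using this
      rw [hcb, hih]
      have hcond : (some (s.getD (j - 1) ' ') = some '(' ∧ c ≠ ')') := by
        refine ⟨congrArg some hP.1, ?_⟩
        rw [← hgd]
        exact hP.2
      have ha : asum (some (s.getD (j - 1) ' ')) (c :: cs) =
          innerScan (some (s.getD (j - 1) ' ')) (c :: cs) 1 1 + asum (some c) cs := by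
        simp only [asum]
        rw [if_pos hcond]
      rw [ha, hgd]
    · have hb : ¬ pipeP s (j - 1) = true := by
        simp only [pipeP, hj1]
        simp only [Bool.and_eq_true, beq_iff_eq, bne_iff_ne, ne_eq]
        intro hcon
        exact hP ⟨hcon.1, hcon.2⟩
      rw [if_neg hb]
      rw [hih]
      have hcond : ¬ (some (s.getD (j - 1) ' ') = some '(' ∧ c ≠ ')') := by
        intro hcon
        apply hP
        refine ⟨Option.some.inj hcon.1, ?_⟩
        rw [hgd]
        exact hcon.2
      have ha : asum (some (s.getD (j - 1) ' ')) (c :: cs) = 0 + asum (some c) cs := by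
        simp only [asum]
        rw [if_neg hcond]
      rw [ha, hgd]
      exact (zero_add _).symm

theorem solution_eq_asum (arrangement : String) :
    solution arrangement = asum none arrangement.toList := by
  unfold solution
  rw [foldl_add_sum (fun i => innerA arrangement.toList
    (List.range' (i + 1) (arrangement.toList.length - (i + 1))) [('(', i)] 1)]
  rw [pipesOf_eq_filter]
  cases h : arrangement.toList with
  | nil => simp [asum]
  | cons c cs =>
    have hdrop : (c :: cs).drop 1 = cs := rfl
    have hs := sum_contrib_eq_asum (c :: cs) cs 1 (by omega) hdrop
    rw [List.range_eq_range']
    simp only [Nat.sub_self] at hs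
    rw [show ((c :: cs).getD 0 ' ') = c from rfl] at hs
    rw [show asum none (c :: cs) = asum (some c) cs from by simp [asum]]
    rw [← hs, zero_add]
    rfl

-- ---- B's loop equals pending stack contributions plus asum ----

theorem stScan_nil (prev : Option Char) (L : Int) :
    ∀ (st : List Int) (d0 : Nat), stScan prev [] L st d0 = 0 := by
  intro st
  induction st with
  | nil => intro d0; simp [stScan]
  | cons e es ih => intro d0; simp [stScan, innerScan, ih]

theorem stScan_laser (cs : List Char) (L : Int) : ∀ (st : List Int) (d0 : Nat), 2 ≤ d0 →
    stScan (some '(') (')' :: cs) L st d0 = stScan (some ')') cs (L + 1) st (d0 - 1) := by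
  intro st
  induction st with
  | nil => intro d0 _; simp [stScan]
  | cons e es ih =>
    intro d0 hd0
    have h2 : d0 - 1 ≠ 0 := by omega
    simp only [stScan]
    rw [ih (d0 + 1) (by omega)]
    have h3 : d0 + 1 - 1 = (d0 - 1) + 1 := by omega
    rw [h3]
    simp [innerScan, h2]
    ring_nf

theorem stScan_open (prev : Option Char) (cs : List Char) (L : Int) :
    ∀ (st : List Int) (d0 : Nat),
    stScan prev ('(' :: cs) L st d0 = stScan (some '(') cs L st (d0 + 1) := by
  intro st
  induction st with
  | nil => intro d0; simp [stScan]
  | cons e es ih =>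
    intro d0
    simp only [stScan]
    rw [ih (d0 + 1)]
    simp [innerScan]

theorem stScan_close (prev : Option Char) (hprev : prev ≠ some '(') (cs : List Char)
    (L : Int) : ∀ (st : List Int) (d0 : Nat), 2 ≤ d0 →
    stScan prev (')' :: cs) L st d0 = stScan (some ')') cs L st (d0 - 1) := by
  intro st
  induction st with
  | nil => intro d0 _; simp [stScan]
  | cons e es ih =>
    intro d0 hd0
    have h2 : d0 - 1 ≠ 0 := by omega
    simp only [stScan]
    rw [ih (d0 + 1) (by omega)]
    have h3 : d0 + 1 - 1 = (d0 - 1) + 1 := by omega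
    rw [h3]
    simp [innerScan, h2, hprev]

theorem stScan_other (prev : Option Char) (c : Char) (hc1 : c ≠ '(') (hc2 : c ≠ ')')
    (cs : List Char) (L : Int) : ∀ (st : List Int) (d0 : Nat), 1 ≤ d0 →
    stScan prev (c :: cs) L st d0 = stScan (some c) cs L st d0 := by
  intro st
  induction st with
  | nil => intro d0 _; simp [stScan]
  | cons e es ih =>
    intro d0 hd0
    have h2 : d0 ≠ 0 := by omega
    simp only [stScan]
    rw [ih (d0 + 1) (by omega)]
    simp [innerScan, hc1, hc2, h2]

theorem bLoop_eq : ∀ (cs : List Char) (prev : Option Char) (ans L : Int) (st : List Int),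
    bLoop cs ans L st prev =
      ans + stScan prev cs L st (if prev = some '(' then 2 else 1) + asum prev cs := by
  intro cs
  induction cs with
  | nil => intro prev ans L st; simp [bLoop, stScan_nil, asum]
  | cons c cs ih =>
    intro prev ans L st
    by_cases hp : prev = some '('
    · by_cases hc : c = ')'
      · -- laser: prev = '(' and c = ')'
        subst hc
        have hb : bLoop (')' :: cs) ans L st prev = bLoop cs ans (L + 1) st (some ')') := by
          simp [bLoop, hp]
        rw [hb, ih, hp]
        simp only [reduceIte]
        rw [stScan_laser cs L st 2 (by omega)]
        have ha : asum (some '(') (')' :: cs) = asum (some ')') cs := by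
          simp [asum]
        rw [ha]
        simp
      · -- push: prev = '(' and c ≠ ')'
        have hb : bLoop (c :: cs) ans L st prev = bLoop cs ans L (L :: st) (some c) := by
          simp [bLoop, hp, hc]
        rw [hb, ih, hp]
        simp only [reduceIte]
        have hs1 : stScan (some c) cs L (L :: st) (if some c = some '(' then 2 else 1) =
            innerScan (some c) cs (if c = '(' then 2 else 1) 1 +
              stScan (some c) cs L st ((if c = '(' then 2 else 1) + 1) := by
          by_cases hcc : c = '('
          · simp [stScan, hcc]
          · simp [stScan, hcc]
        rw [hs1]
        have hs2 : innerScan (some '(') (c :: cs) 1 1 =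
            innerScan (some c) cs (if c = '(' then 2 else 1) 1 := by
          by_cases hcc : c = '('
          · simp [innerScan, hcc]
          · simp [innerScan, hcc, hc]
        have hs3 : stScan (some '(') (c :: cs) L st 2 =
            stScan (some c) cs L st ((if c = '(' then 2 else 1) + 1) := by
          by_cases hcc : c = '('
          · rw [hcc, stScan_open]; simp
          · rw [stScan_other _ c hcc hc _ _ _ _ (by omega)]; simp [hcc]
        have ha : asum (some '(') (c :: cs) =
            innerScan (some '(') (c :: cs) 1 1 + asum (some c) cs := by
          simp [asum, hc]
        rw [ha, hs2, hs3]
        ring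
    · by_cases hc : c = ')'
      · subst hc
        match st with
        | [] =>
          -- unmatched ')': nothing open
          have hb : bLoop (')' :: cs) ans L [] prev = bLoop cs ans L [] (some ')') := by
            simp [bLoop, hp]
          rw [hb, ih]
          simp [stScan, asum, hp]
        | e :: es =>
          -- pipe close: pop the innermost open pipe
          have hb : bLoop (')' :: cs) ans L (e :: es) prev =
              bLoop cs (ans + 1 + L - e) L es (some ')') := by
            simp [bLoop, hp]
          rw [hb, ih]
          rw [show (if (some ')' : Option Char) = some '(' then (2 : Nat) else 1) = 1 from by decide]
          have hs1 : stScan prev (')' :: cs) L (e :: es) (if prev = some '(' then 2 else 1) =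
              (1 + L - e) + stScan (some ')') cs L es 1 := by
            rw [if_neg hp]
            simp only [stScan]
            rw [stScan_close prev hp cs L es 2 (by omega)]
            simp [innerScan, hp]
          rw [hs1]
          have ha : asum prev (')' :: cs) = asum (some ')') cs := by
            simp [asum]
          rw [ha]
          ring
      · -- prev ≠ '(' and c ≠ ')': state passes through (maybe a pipe-depth bump on '(')
        have hb : bLoop (c :: cs) ans L st prev = bLoop cs ans L st (some c) := by
          simp [bLoop, hp, hc]
        rw [hb, ih]
        have hs : stScan prev (c :: cs) L st (if prev = some '(' then 2 else 1) =
            stScan (some c) cs L st (if some c = some '(' then 2 else 1) := by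
          rw [if_neg hp]
          by_cases hcc : c = '('
          · rw [hcc, stScan_open]; simp
          · rw [stScan_other _ c hcc hc _ _ _ _ (by omega)]; simp [hcc]
        have ha : asum prev (c :: cs) = asum (some c) cs := by
          simp [asum, hp]
        rw [hs, ha]

-- ===== VERDICT (by name: the statement is the Claim_ definition above) =====
theorem solution_spec : Claim_equal_solution := by
  intro arrangement _
  unfold Spec_solution
  rw [solution_eq_asum]
  unfold solution_alt
  rw [bLoop_eq]
  simp [stScan]
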